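-- pv_equiv track=rewrite | github.com/BLannoo/Advent-of-Code-2019 | day04/solution.py | silver_constraints
-- ===== SOURCE A (Python) =====
-- def silver_constraints(i):
--     digits = str(i)
--     for j in range(len(digits) - 1):
--         if digits[j] > digits[j + 1]:
--             return False
--     for j in range(len(digits) - 1):
--         if digits[j] == digits[j + 1]:
--             return True
--     return False
-- ===== SOURCE B (Python) =====
-- def silver_constraints(i):
--     s = str(i)
--     return list(s) == sorted(s) and len(set(s)) < len(s)
-- ===== Notes on version B (the rewrite author's own statement) =====
-- stated objective: idiomatic
-- what changed: Replaces the two index-based adjacent-pair scans with a sort-equality check (non-decreasing) plus a set-cardinality test (some repeated digit), exact because in a non-decreasing string every duplicate is adjacent and the conjunction short-circuits when non-decrease fails.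
import Mathlib
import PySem

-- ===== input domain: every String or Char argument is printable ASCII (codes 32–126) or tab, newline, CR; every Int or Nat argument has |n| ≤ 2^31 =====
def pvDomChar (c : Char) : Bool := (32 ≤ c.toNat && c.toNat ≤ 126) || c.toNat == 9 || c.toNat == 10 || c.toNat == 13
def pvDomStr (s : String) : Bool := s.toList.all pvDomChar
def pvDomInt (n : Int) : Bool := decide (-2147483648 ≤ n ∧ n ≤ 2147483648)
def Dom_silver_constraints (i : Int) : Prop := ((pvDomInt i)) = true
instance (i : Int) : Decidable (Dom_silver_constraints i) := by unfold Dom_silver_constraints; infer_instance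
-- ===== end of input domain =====

-- B replaces A's two index loops by the idiomatic 'sorted equals itself and has a repeated digit' check;
-- exact because within a non-decreasing digit string every duplicate is adjacent.

-- ===== PORT A =====
def silver_constraints (i : Int) : Bool :=
  let digits := PySem.Int.toChars i
  if (PySem.List.pyRange 0 ((digits.length : Int) - 1)).any
      (fun j => decide (PySem.List.pyGetD digits j ' ' > PySem.List.pyGetD digits (j + 1) ' ')) then
    false
  else
    (PySem.List.pyRange 0 ((digits.length : Int) - 1)).any
      (fun j => PySem.List.pyGetD digits j ' ' == PySem.List.pyGetD digits (j + 1) ' ')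

-- ===== PORT B =====
def silver_constraints_alt (i : Int) : Bool :=
  let s := PySem.Int.toChars i
  decide (s = PySem.List.sorted s (fun c => c)) &&
  decide ((PySem.Set.ofList s).length < s.length)

-- ===== PRECONDITION & SPEC =====
def Spec_silver_constraints (i : Int) (out : Bool) : Prop := out = silver_constraints_alt i
instance (i : Int) (out : Bool) : Decidable (Spec_silver_constraints i out) := by unfold Spec_silver_constraints; infer_instance

-- ===== CLAIM (what is proved, stated in full; the proofs are below) =====
def Claim_equal_silver_constraints : Prop := ∀ (i : Int), Dom_silver_constraints i → Spec_silver_constraints i (silver_constraints i)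

-- ===== LEMMAS AND PROOFS =====

-- the adjacent-pair 'any' over range(len-1), as an existence statement over Nat indices
lemma pv_any_adj (ds : List Char) (p : Char → Char → Bool) :
    ((PySem.List.pyRange 0 ((ds.length : Int) - 1)).any
      (fun j => p (PySem.List.pyGetD ds j ' ') (PySem.List.pyGetD ds (j + 1) ' ')) = true)
    ↔ ∃ (j : Nat) (_ : j + 1 < ds.length), p ds[j] ds[j + 1] = true := by
  rw [List.any_eq_true]
  constructor
  · rintro ⟨x, hx, hp⟩
    rw [PySem.List.mem_pyRange_one] at hx
    obtain ⟨h0, h1⟩ := hx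
    have hx1 : (x + 1).toNat = x.toNat + 1 := by omega
    rw [PySem.List.pyGetD_eq_getElem ds ' ' h0 (by omega),
        PySem.List.pyGetD_eq_getElem ds ' ' (by omega) (by omega)] at hp
    refine ⟨x.toNat, by omega, ?_⟩
    simpa [hx1] using hp
  · rintro ⟨j, hj, hp⟩
    refine ⟨(j : Int), ?_, ?_⟩
    · rw [PySem.List.mem_pyRange_one]; omega
    · have h1 : ((j : Int) + 1).toNat = j + 1 := by omega
      rw [PySem.List.pyGetD_eq_getElem ds ' ' (by omega) (by omega),
          PySem.List.pyGetD_eq_getElem ds ' ' (by omega) (by omega)]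
      simpa [h1] using hp

-- adjacent non-decrease implies global monotonicity of the entries
lemma pv_mono (ds : List Char)
    (h : ∀ (j : Nat) (_ : j + 1 < ds.length), ds[j] ≤ ds[j + 1])
    (p q : Nat) (hp : p < ds.length) (hq : q < ds.length) (hpq : p ≤ q) :
    ds[p] ≤ ds[q] := by
  revert hq hpq
  induction q with
  | zero =>
    intro hq hpq
    have hp0 : p = 0 := by omega
    subst hp0; exact le_refl _
  | succ q ih =>
    intro hq hpq
    rcases Nat.lt_or_ge p (q + 1) with hlt | hge
    · exact le_trans (ih (by omega) (by omega)) (h q hq)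
    · have : p = q + 1 := by omega
      subst this; exact le_refl _

lemma pv_nodup_iff_get (ds : List Char) :
    ds.Nodup ↔ ∀ (i j : Nat) (_ : i < ds.length) (_ : j < ds.length), i < j → ds[i] ≠ ds[j] := by
  unfold List.Nodup
  exact List.pairwise_iff_getElem

-- Set.ofList never grows past the source list
lemma pv_foldl_add_len_le (xs : List Char) : ∀ acc : List Char,
    (xs.foldl PySem.Set.add acc).length ≤ acc.length + xs.length := by
  induction xs with
  | nil => intro acc; simp
  | cons x xs ih =>
    intro acc
    have hstep : (PySem.Set.add acc x).length ≤ acc.length + 1 := by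
      simp only [PySem.Set.add]
      split <;> simp
    calc ((x :: xs).foldl PySem.Set.add acc).length
        = (xs.foldl PySem.Set.add (PySem.Set.add acc x)).length := by simp [List.foldl_cons]
      _ ≤ (PySem.Set.add acc x).length + xs.length := ih _
      _ ≤ acc.length + 1 + xs.length := by omega
      _ = acc.length + (x :: xs).length := by simp only [List.length_cons]; omega

lemma pv_foldl_add_of_fresh (xs : List Char) : ∀ acc : List Char,
    (∀ x ∈ xs, x ∉ acc) → xs.Nodup → xs.foldl PySem.Set.add acc = acc ++ xs := by
  induction xs with
  | nil => intro acc _ _; simp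
  | cons x xs ih =>
    intro acc hfresh hnd
    have hxacc : x ∉ acc := hfresh x (by simp)
    have hadd : PySem.Set.add acc x = acc ++ [x] := by
      simp only [PySem.Set.add]
      split
      · rename_i hcon
        exact absurd (by simpa using hcon) hxacc
      · rfl
    have hnd' := hnd
    rw [List.nodup_cons] at hnd'
    have := ih (acc ++ [x]) (by
      intro y hy
      simp only [List.mem_append, List.mem_singleton]
      push_neg
      exact ⟨hfresh y (by simp [hy]), fun hyx => hnd'.1 (hyx ▸ hy)⟩) hnd'.2
    simp only [List.foldl_cons, hadd, this, List.append_assoc, List.singleton_append]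

lemma pv_foldl_add_len_lt (xs : List Char) : ∀ acc : List Char,
    (¬ xs.Nodup ∨ ∃ x ∈ xs, x ∈ acc) →
    (xs.foldl PySem.Set.add acc).length < acc.length + xs.length := by
  induction xs with
  | nil =>
    intro acc h
    rcases h with h | ⟨x, hx, _⟩
    · exact absurd List.nodup_nil h
    · simp at hx
  | cons x xs ih =>
    intro acc h
    by_cases hxacc : x ∈ acc
    · have hadd : PySem.Set.add acc x = acc := by
        simp only [PySem.Set.add]
        split
        · rfl
        · rename_i hcon
          exact absurd (by simpa using hxacc) (by simpa using hcon)
      calc ((x :: xs).foldl PySem.Set.add acc).length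
          = (xs.foldl PySem.Set.add acc).length := by simp [List.foldl_cons, hadd]
        _ ≤ acc.length + xs.length := pv_foldl_add_len_le xs acc
        _ < acc.length + (x :: xs).length := by simp only [List.length_cons]; omega
    · have hadd : PySem.Set.add acc x = acc ++ [x] := by
        simp only [PySem.Set.add]
        split
        · rename_i hcon
          exact absurd (by simpa using hcon) hxacc
        · rfl
      have hnext : ¬ xs.Nodup ∨ ∃ y ∈ xs, y ∈ acc ++ [x] := by
        rcases h with h | ⟨y, hy, hyacc⟩
        · rw [List.nodup_cons] at h
          push_neg at h
          by_cases hx : x ∈ xs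
          · exact Or.inr ⟨x, hx, by simp⟩
          · exact Or.inl (h hx)
        · rcases List.mem_cons.mp hy with rfl | hy'
          · exact absurd hyacc hxacc
          · exact Or.inr ⟨y, hy', by simp [hyacc]⟩
      calc ((x :: xs).foldl PySem.Set.add acc).length
          = (xs.foldl PySem.Set.add (acc ++ [x])).length := by simp [List.foldl_cons, hadd]
        _ < (acc ++ [x]).length + xs.length := ih _ hnext
        _ = acc.length + (x :: xs).length := by simp only [List.length_append, List.length_cons, List.length_nil]; omega

lemma pv_ofList_len_lt_iff (xs : List Char) :
    (PySem.Set.ofList xs).length < xs.length ↔ ¬ xs.Nodup := by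
  constructor
  · intro hlt hnd
    have := pv_foldl_add_of_fresh xs [] (by simp) hnd
    rw [PySem.Set.ofList_eq_foldl] at hlt
    rw [this] at hlt
    simp at hlt
  · intro hnd
    have := pv_foldl_add_len_lt xs [] (Or.inl hnd)
    rw [PySem.Set.ofList_eq_foldl]
    simpa using this

-- the core equivalence, for an arbitrary character list
lemma pv_core (ds : List Char) :
    (if (PySem.List.pyRange 0 ((ds.length : Int) - 1)).any
        (fun j => decide (PySem.List.pyGetD ds j ' ' > PySem.List.pyGetD ds (j + 1) ' ')) then
      false
    else
      (PySem.List.pyRange 0 ((ds.length : Int) - 1)).any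
        (fun j => PySem.List.pyGetD ds j ' ' == PySem.List.pyGetD ds (j + 1) ' '))
    = (decide (ds = PySem.List.sorted ds (fun c => c)) &&
       decide ((PySem.Set.ofList ds).length < ds.length)) := by
  by_cases hdesc : (PySem.List.pyRange 0 ((ds.length : Int) - 1)).any
      (fun j => decide (PySem.List.pyGetD ds j ' ' > PySem.List.pyGetD ds (j + 1) ' ')) = true
  · -- a descending adjacent pair exists: both sides are false
    obtain ⟨j, hj, hp⟩ := (pv_any_adj ds (fun a b => decide (a > b))).mp hdesc
    have hgt : ds[j + 1] < ds[j] := by simpa using hp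
    have hne : ds ≠ PySem.List.sorted ds (fun c => c) := by
      intro heq
      have hpw := PySem.List.sorted_pairwise ds (fun c => c)
      rw [← heq] at hpw
      have hle := (List.pairwise_iff_getElem.mp hpw) j (j + 1) (by omega) hj (by omega)
      exact absurd hle (not_le.mpr hgt)
    simp [hdesc, hne]
  · -- non-decreasing: A's second loop ↔ a repeated character
    have hadj : ∀ (j : Nat) (_ : j + 1 < ds.length), ds[j] ≤ ds[j + 1] := by
      intro j hj
      by_contra hlt
      exact hdesc ((pv_any_adj ds (fun a b => decide (a > b))).mpr
        ⟨j, hj, by simpa using not_le.mp hlt⟩)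
    have hpw : List.Pairwise (fun a b : Char => a ≤ b) ds := by
      rw [List.pairwise_iff_getElem]
      intro a b ha hb hab
      exact pv_mono ds hadj a b (by omega) hb (by omega)
    have hsorted : ds = PySem.List.sorted ds (fun c => c) :=
      (PySem.List.sorted_eq_self_of_pairwise ds (fun c => c) hpw).symm
    have hiff : ((PySem.List.pyRange 0 ((ds.length : Int) - 1)).any
        (fun j => PySem.List.pyGetD ds j ' ' == PySem.List.pyGetD ds (j + 1) ' ') = true)
        ↔ ¬ ds.Nodup := by
      rw [pv_any_adj ds (fun a b => a == b)]
      constructor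
      · rintro ⟨j, hj, hp⟩ hnd
        exact (pv_nodup_iff_get ds).mp hnd j (j + 1) (by omega) hj (by omega) (by simpa using hp)
      · intro hnd
        rw [pv_nodup_iff_get ds] at hnd
        push_neg at hnd
        obtain ⟨a, b, ha, hb, hab, heq⟩ := hnd
        have h1 : ds[a] ≤ ds[a + 1] := hadj a (by omega)
        have h2 : ds[a + 1] ≤ ds[b] := pv_mono ds hadj (a + 1) b (by omega) hb (by omega)
        refine ⟨a, by omega, ?_⟩
        have : ds[a] = ds[a + 1] := le_antisymm h1 (heq ▸ h2)
        simpa using this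
    rw [if_neg hdesc]
    rcases Bool.eq_false_or_eq_true ((PySem.List.pyRange 0 ((ds.length : Int) - 1)).any
        (fun j => PySem.List.pyGetD ds j ' ' == PySem.List.pyGetD ds (j + 1) ' ')) with hA | hA
    · rw [hA]
      have hlt : (PySem.Set.ofList ds).length < ds.length :=
        (pv_ofList_len_lt_iff ds).mpr (hiff.mp hA)
      simp [← hsorted, hlt]
    · rw [hA]
      have hnlt : ¬ (PySem.Set.ofList ds).length < ds.length := by
        rw [pv_ofList_len_lt_iff]
        intro h
        exact absurd (hiff.mpr h) (by simp [hA])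
      simp [hnlt]

-- ===== VERDICT (by name: the statement is the Claim_ definition above) =====
theorem silver_constraints_spec : Claim_equal_silver_constraints := by
  intro i _
  unfold Spec_silver_constraints silver_constraints silver_constraints_alt
  exact pv_core (PySem.Int.toChars i)
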